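-- pv_equiv track=rewrite | github.com/klknet/geeks4geeks | algorithm/bitwise/convert_A_to_B.py | smallest_power_of_2
-- ===== SOURCE A (Python) =====
-- def smallest_power_of_2(n):
--     if n and not n & n - 1:
--         return n
--     c = 0
--     while n != 0:
--         c += 1
--         n >>= 1
--     return 1 << c
-- ===== SOURCE B (Python) =====
-- def smallest_power_of_2(n):
--     # Branchless bit-smearing round-up (valid on the task's 32-bit domain):
--     # propagate the top set bit of n-1 downward, then add 1.
--     if n == 0:
--         return 1
--     m = n - 1
--     m |= m >> 1
--     m |= m >> 2
--     m |= m >> 4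
--     m |= m >> 8
--     m |= m >> 16
--     return m + 1
-- ===== Notes on version B (the rewrite author's own statement) =====
-- stated objective: alternative
-- what changed: Drops A's power-of-two guard and bit-counting while loop entirely; B rounds up with the branchless bit-smearing trick (m = n-1; OR in m>>1,2,4,8,16; return m+1), a fixed sequence of five shift-OR steps valid on the 32-bit domain.
import Mathlib
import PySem

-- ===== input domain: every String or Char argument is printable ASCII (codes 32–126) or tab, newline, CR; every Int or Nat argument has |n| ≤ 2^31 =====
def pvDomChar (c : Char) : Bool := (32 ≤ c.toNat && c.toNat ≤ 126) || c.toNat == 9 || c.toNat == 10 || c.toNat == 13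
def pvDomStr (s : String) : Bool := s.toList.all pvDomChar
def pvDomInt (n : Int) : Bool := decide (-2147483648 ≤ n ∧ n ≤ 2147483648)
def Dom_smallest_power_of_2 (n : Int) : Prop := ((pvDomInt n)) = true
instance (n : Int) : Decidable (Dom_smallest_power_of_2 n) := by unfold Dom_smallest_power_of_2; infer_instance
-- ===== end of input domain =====

-- B replaces A's power-of-two guard + shift-and-count loop by the branchless bit-smearing
-- round-up (m = n-1; m |= m>>1,2,4,8,16; m+1), exact on the task's 32-bit domain.
-- On n < 0 Python A's `while n != 0: n >>= 1` never terminates; Pre_ excludes negatives.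


-- ===== PORT A =====
-- A's while loop `c = 0; while n != 0: c += 1; n >>= 1`, recursing on the Nat value
-- (on Pre_ we have 0 ≤ n, so Python's `n >>= 1` is exactly `m / 2` on m = n.toNat).
def pvCountShifts (m : Nat) : Nat :=
  if h : m = 0 then 0 else pvCountShifts (m / 2) + 1
decreasing_by exact Nat.div_lt_self (Nat.pos_of_ne_zero h) (by norm_num)

def smallest_power_of_2 (n : Int) : Int :=
  -- `if n and not n & n - 1: return n`
  if n ≠ 0 ∧ Int.land n (n - 1) = 0 then n
  else ((1 <<< pvCountShifts n.toNat : Nat) : Int)  -- `return 1 << c`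

-- ===== PORT B =====
-- Source B's smear `m = n - 1; m |= m >> 1; … ; m |= m >> 16; return m + 1`
-- (on Pre_ and n ≠ 0 we have n ≥ 1, so Python's |, >> act on the Nat value (n-1).toNat).
def pvSmear (m : Nat) : Nat :=
  let m1 := m ||| (m >>> 1)
  let m2 := m1 ||| (m1 >>> 2)
  let m3 := m2 ||| (m2 >>> 4)
  let m4 := m3 ||| (m3 >>> 8)
  m4 ||| (m4 >>> 16)

def smallest_power_of_2_alt (n : Int) : Int :=
  if n = 0 then 1
  else ((pvSmear (n - 1).toNat + 1 : Nat) : Int)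

-- ===== PRECONDITION & SPEC =====
-- Pre_ excludes n < 0: there A's `while n != 0: n >>= 1` loops forever (Python -1 >> 1 == -1).
def Pre_smallest_power_of_2 (n : Int) : Prop := 0 ≤ n
instance (n : Int) : Decidable (Pre_smallest_power_of_2 n) := by unfold Pre_smallest_power_of_2; infer_instance
def pvWitness_smallest_power_of_2 : Int := 5

def Spec_smallest_power_of_2 (n : Int) (out : Int) : Prop := out = smallest_power_of_2_alt n
instance (n : Int) (out : Int) : Decidable (Spec_smallest_power_of_2 n out) := by unfold Spec_smallest_power_of_2; infer_instance

-- ===== CLAIM (what is proved, stated in full; the proofs are below) =====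
def Claim_equal_smallest_power_of_2 : Prop := ∀ (n : Int), Dom_smallest_power_of_2 n → Pre_smallest_power_of_2 n → Spec_smallest_power_of_2 n (smallest_power_of_2 n)

-- ===== LEMMAS AND PROOFS =====

-- the counting loop computes Nat.size
theorem pvSize_div2 (m : Nat) (h : m ≠ 0) : Nat.size m = Nat.size (m / 2) + 1 := by
  conv_lhs => rw [← Nat.bit_testBit_zero_shiftRight_one m]
  rw [Nat.size_bit]
  · simp [Nat.shiftRight_one]
  · rw [Nat.bit_testBit_zero_shiftRight_one]; exact h

theorem pvCountShifts_eq_size (m : Nat) : pvCountShifts m = Nat.size m := by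
  induction m using Nat.strong_induction_on with
  | _ m ih =>
    rw [pvCountShifts]
    split
    · simp [*, Nat.size_zero]
    · rename_i h
      rw [ih (m / 2) (Nat.div_lt_self (Nat.pos_of_ne_zero h) one_lt_two), pvSize_div2 m h]

-- a number in [2^k, 2^(k+1)) has bit k set
theorem pvTestBit_of_bounds (x k : Nat) (h1 : 2 ^ k ≤ x) (h2 : x < 2 ^ (k + 1)) :
    x.testBit k = true := by
  rw [Nat.testBit_eq_decide_div_mod_eq]
  have hdiv : x / 2 ^ k = 1 := by
    apply Nat.div_eq_of_lt_le
    · omega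
    · have hp : (2:Nat) ^ (k + 1) = 2 ^ k * 2 := Nat.pow_succ 2 k
      omega
  simp [hdiv]

-- one smearing step widens the window of bits OR-ed into each position from v to u = v + w
theorem pvSmearStep (m x w v u : Nat) (hw : w ≤ v) (hu : u = v + w)
    (P : ∀ i, x.testBit i = true ↔ ∃ j, j < v ∧ m.testBit (i + j) = true) :
    ∀ i, (x ||| x >>> w).testBit i = true ↔ ∃ j, j < u ∧ m.testBit (i + j) = true := by
  intro i
  rw [Nat.testBit_or, Nat.testBit_shiftRight, Bool.or_eq_true, P i, P (w + i)]
  constructor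
  · rintro (⟨j, hj, hb⟩ | ⟨j, hj, hb⟩)
    · exact ⟨j, by omega, hb⟩
    · refine ⟨w + j, by omega, ?_⟩
      have he : i + (w + j) = w + i + j := by omega
      rw [he]; exact hb
  · rintro ⟨j, hj, hb⟩
    by_cases hjv : j < v
    · exact Or.inl ⟨j, hjv, hb⟩
    · refine Or.inr ⟨j - w, by omega, ?_⟩
      have he : w + i + (j - w) = i + j := by omega
      rw [he]; exact hb

theorem pvSmear_testBit (m : Nat) :
    ∀ i, (pvSmear m).testBit i = true ↔ ∃ j, j < 32 ∧ m.testBit (i + j) = true := by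
  have h1 : ∀ i, m.testBit i = true ↔ ∃ j, j < 1 ∧ m.testBit (i + j) = true := by
    intro i
    constructor
    · intro h; exact ⟨0, by omega, by simpa using h⟩
    · rintro ⟨j, hj, hb⟩; interval_cases j; simpa using hb
  have h2 := pvSmearStep m m 1 1 2 (by omega) (by norm_num) h1
  have h4 := pvSmearStep m _ 2 2 4 (by omega) (by norm_num) h2
  have h8 := pvSmearStep m _ 4 4 8 (by omega) (by norm_num) h4
  have h16 := pvSmearStep m _ 8 8 16 (by omega) (by norm_num) h8
  have h32 := pvSmearStep m _ 16 16 32 (by omega) (by norm_num) h16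
  intro i
  simpa only [pvSmear] using h32 i

-- for m < 2^32, the smear yields 2^(size m) - 1
theorem pvSmear_eq (m : Nat) (hm : m < 2 ^ 32) : pvSmear m = 2 ^ Nat.size m - 1 := by
  apply Nat.eq_of_testBit_eq
  intro i
  rw [Nat.testBit_two_pow_sub_one]
  by_cases hi : i < Nat.size m
  · have hsle : Nat.size m ≤ 32 := Nat.size_le.2 hm
    have hne : m ≠ 0 := by
      intro h0; rw [h0] at hi; simp [Nat.size_zero] at hi
    have htop : m.testBit (Nat.size m - 1) = true := by
      apply pvTestBit_of_bounds
      · exact Nat.lt_size.1 (by omega)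
      · have hlt := Nat.lt_size_self m
        have hpow : (2:Nat) ^ Nat.size m ≤ 2 ^ (Nat.size m - 1 + 1) :=
          Nat.pow_le_pow_right (by omega) (by omega)
        omega
    have hb : (pvSmear m).testBit i = true := by
      rw [pvSmear_testBit]
      refine ⟨Nat.size m - 1 - i, by omega, ?_⟩
      have he : i + (Nat.size m - 1 - i) = Nat.size m - 1 := by omega
      rw [he]; exact htop
    simp [hb, hi]
  · have hb : (pvSmear m).testBit i = false := by
      rw [Bool.eq_false_iff]
      intro h
      obtain ⟨j, _, hbit⟩ := (pvSmear_testBit m i).1 h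
      have hge := Nat.ge_two_pow_of_testBit hbit
      have := Nat.lt_size.2 hge
      omega
    simp [hb, hi]

-- Nat.size (2^k - 1) = k
theorem pvSize_pow_sub_one (k : Nat) : Nat.size (2 ^ k - 1) = k := by
  rcases Nat.eq_zero_or_pos k with hk | hk
  · subst hk; simp
  · have hle : Nat.size (2 ^ k - 1) ≤ k :=
      Nat.size_le.2 (by have := Nat.one_le_two_pow (n := k); omega)
    have hlt : k - 1 < Nat.size (2 ^ k - 1) := by
      apply Nat.lt_size.2
      have hp : (2:Nat) ^ (k - 1) * 2 = 2 ^ (k - 1 + 1) := (Nat.pow_succ 2 (k - 1)).symm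
      have hk1 : k - 1 + 1 = k := by omega
      rw [hk1] at hp
      have h1 : (1:Nat) ≤ 2 ^ (k - 1) := Nat.one_le_two_pow
      omega
    omega

-- `m & (m-1) == 0` characterises m = 2^(size m - 1), for m ≠ 0
theorem pvLand_pred_zero_iff (m : Nat) (hm : m ≠ 0) :
    m &&& (m - 1) = 0 ↔ m = 2 ^ (Nat.size m - 1) := by
  have hs1 : 1 ≤ Nat.size m := Nat.lt_size.2 (by omega)
  have hlo : 2 ^ (Nat.size m - 1) ≤ m := Nat.lt_size.1 (by omega)
  have hhi : m < 2 ^ Nat.size m := Nat.lt_size_self m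
  have hhi' : m < 2 ^ (Nat.size m - 1 + 1) := by
    have he : Nat.size m - 1 + 1 = Nat.size m := by omega
    rw [he]; exact hhi
  constructor
  · intro h
    by_contra hne
    -- m > 2^(size m - 1), so bit (size m - 1) is set in both m and m - 1
    have hmtop := pvTestBit_of_bounds m (Nat.size m - 1) hlo hhi'
    have hptop := pvTestBit_of_bounds (m - 1) (Nat.size m - 1) (by omega) (by omega)
    have hand : (m &&& (m - 1)).testBit (Nat.size m - 1) = true := by
      rw [Nat.testBit_and, hmtop, hptop]; rfl
    rw [h, Nat.zero_testBit] at hand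
    exact Bool.false_ne_true hand
  · intro h
    apply Nat.eq_of_testBit_eq
    intro i
    rw [Nat.zero_testBit, Nat.testBit_and]
    by_cases hi : i = Nat.size m - 1
    · have hf : (m - 1).testBit i = false := by
        apply Nat.testBit_lt_two_pow
        rw [hi, ← h]; omega
      rw [hf, Bool.and_false]
    · conv_lhs => rw [h]
      rw [Nat.testBit_two_pow]
      simp [Ne.symm hi]

-- size (m-1) = size m when m ≠ 0 is not a power of two
theorem pvSize_pred (m : Nat) (hm : m ≠ 0) (hne : m ≠ 2 ^ (Nat.size m - 1)) :
    Nat.size (m - 1) = Nat.size m := by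
  have hs1 : 1 ≤ Nat.size m := Nat.lt_size.2 (by omega)
  have hlo : 2 ^ (Nat.size m - 1) ≤ m := Nat.lt_size.1 (by omega)
  have hhi : m < 2 ^ Nat.size m := Nat.lt_size_self m
  have hle : Nat.size (m - 1) ≤ Nat.size m := Nat.size_le.2 (by omega)
  have hlt : Nat.size m - 1 < Nat.size (m - 1) := Nat.lt_size.2 (by omega)
  omega

theorem pvA_zero : smallest_power_of_2 0 = 1 := by
  unfold smallest_power_of_2
  rw [if_neg (by simp), pvCountShifts]
  norm_num

theorem pvB_zero : smallest_power_of_2_alt 0 = 1 := by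
  unfold smallest_power_of_2_alt
  rw [if_pos rfl]

-- ===== VERDICT (by name: the statement is the Claim_ definition above) =====
theorem smallest_power_of_2_spec : Claim_equal_smallest_power_of_2 := by
  intro n hdom hpre
  unfold Spec_smallest_power_of_2
  unfold Pre_smallest_power_of_2 at hpre
  unfold Dom_smallest_power_of_2 pvDomInt at hdom
  simp only [decide_eq_true_eq] at hdom
  obtain ⟨m, rfl⟩ : ∃ m : Nat, n = (m : Int) := ⟨n.toNat, (Int.toNat_of_nonneg hpre).symm⟩
  by_cases h0 : m = 0
  · rw [h0, Nat.cast_zero, pvA_zero, pvB_zero]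
  · have hm0 : ((m : Int) ≠ 0) := by exact_mod_cast h0
    have hm32 : m ≤ 2147483648 := by exact_mod_cast hdom.2
    have hcast : ((m : Int) - 1).toNat = m - 1 := by omega
    have hland : Int.land (m : Int) ((m : Int) - 1) = ((m &&& (m - 1) : Nat) : Int) := by
      rw [show ((m : Int) - 1) = ((m - 1 : Nat) : Int) by omega]; rfl
    have h2sz : (1:Nat) ≤ 2 ^ Nat.size (m - 1) := Nat.one_le_two_pow
    have hB : smallest_power_of_2_alt (m : Int) = ((2 ^ Nat.size (m - 1) : Nat) : Int) := by
      unfold smallest_power_of_2_alt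
      rw [if_neg hm0, hcast, pvSmear_eq (m - 1) (by norm_num; omega)]
      rw [show 2 ^ Nat.size (m - 1) - 1 + 1 = 2 ^ Nat.size (m - 1) by omega]
    by_cases hpow : m &&& (m - 1) = 0
    · -- power of two: A returns n; B returns 2^(size (m-1)) = m
      have hm : m = 2 ^ (Nat.size m - 1) := (pvLand_pred_zero_iff m h0).1 hpow
      have hA : smallest_power_of_2 (m : Int) = (m : Int) := by
        unfold smallest_power_of_2
        rw [if_pos ⟨hm0, by rw [hland]; exact_mod_cast hpow⟩]
      have hsz : Nat.size (m - 1) = Nat.size m - 1 := by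
        conv_lhs => rw [hm]
        exact pvSize_pow_sub_one _
      rw [hA, hB, hsz, ← hm]
    · -- not a power of two: both sides are 2^(size m)
      have hne : m ≠ 2 ^ (Nat.size m - 1) := fun h => hpow ((pvLand_pred_zero_iff m h0).2 h)
      have hA : smallest_power_of_2 (m : Int) = ((1 <<< pvCountShifts m : Nat) : Int) := by
        unfold smallest_power_of_2
        rw [if_neg (by
          rintro ⟨-, hz⟩
          rw [hland] at hz
          exact hpow (by exact_mod_cast hz)), Int.toNat_natCast]
      rw [hA, hB, pvCountShifts_eq_size, pvSize_pred m h0 hne, Nat.shiftLeft_eq]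
      norm_num
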